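-- pv_equiv track=rewrite | github.com/lvzongyao/pytorch-image-models | open-set-calibration/map_labels.py | map_labels_only_idx
-- ===== SOURCE A (Python) =====
-- def map_labels_only_idx(labels, excluded_labels, included_labels):
--     """
--     :param labels -
--     :param excluded_labels -
--     :param included_labels -
--
--     :returns
--     """
--     new_labels = []
--     idxs = []
--     for idx, y in enumerate(labels):
--         if y not in excluded_labels:
--             new_labels.append(y)
--             idxs.append(idx)
--         else:
--             new_labels.append(-1)
--     mapped_labels = []
--     for new_y in new_labels:
--         if new_y == -1:
--             mapped_labels.append(new_y)
--         else:
--             mapped_labels.append(included_labels.index(new_y))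
--     return mapped_labels, idxs
-- ===== SOURCE B (Python) =====
-- def map_labels_only_idx(labels, excluded_labels, included_labels):
--     # Single fused pass over enumerate(labels): no intermediate new_labels buffer.
--     mapped_labels = []
--     idxs = []
--     for idx, y in enumerate(labels):
--         if y not in excluded_labels:
--             idxs.append(idx)
--             mapped_labels.append(-1 if y == -1 else included_labels.index(y))
--         else:
--             mapped_labels.append(-1)
--     return mapped_labels, idxs
-- ===== Notes on version B (the rewrite author's own statement) =====
-- stated objective: simpler
-- what changed: Fuses A's two passes into one pass over enumerate(labels), computing each mapped label directly and eliminating the intermediate new_labels buffer.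
import Mathlib
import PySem

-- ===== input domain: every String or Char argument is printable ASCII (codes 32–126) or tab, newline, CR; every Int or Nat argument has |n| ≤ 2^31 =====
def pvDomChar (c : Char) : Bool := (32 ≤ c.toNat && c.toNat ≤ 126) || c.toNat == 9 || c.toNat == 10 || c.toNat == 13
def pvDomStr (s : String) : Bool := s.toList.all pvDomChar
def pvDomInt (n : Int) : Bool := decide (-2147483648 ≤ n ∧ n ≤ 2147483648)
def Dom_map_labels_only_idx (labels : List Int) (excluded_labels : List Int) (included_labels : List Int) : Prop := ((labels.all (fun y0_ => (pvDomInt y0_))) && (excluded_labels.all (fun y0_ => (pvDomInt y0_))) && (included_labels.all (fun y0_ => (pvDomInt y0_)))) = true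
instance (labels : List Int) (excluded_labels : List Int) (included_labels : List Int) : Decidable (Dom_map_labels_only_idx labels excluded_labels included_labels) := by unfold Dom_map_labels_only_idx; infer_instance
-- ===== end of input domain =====

-- B fuses A's two passes into a single pass over enumerate(labels), eliminating the intermediate new_labels buffer (simpler).


-- ===== PORT A =====
-- literal port of A: first pass builds (new_labels, idxs) over enumerate(labels);
-- second pass maps new_labels through included_labels.index (y == -1 kept as -1).
-- included_labels.index(y) raises ValueError when y ∉ included_labels: that case is
-- excluded by Pre_; the port writes (index? …).getD 0 there (dead inside Pre_).
def map_labels_only_idx (labels : List Int) (excluded_labels : List Int) (included_labels : List Int) : List Int × List Int :=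
  let pass1 := (PySem.List.enumerate labels 0).foldl
    (fun (acc : List Int × List Int) (p : Int × Int) =>
      if ¬ (p.2 ∈ excluded_labels) then (acc.1 ++ [p.2], acc.2 ++ [p.1])
      else (acc.1 ++ [(-1 : Int)], acc.2)) ([], [])
  let mapped_labels := pass1.1.foldl
    (fun (acc : List Int) (new_y : Int) =>
      if new_y = -1 then acc ++ [new_y]
      else acc ++ [(((PySem.List.index? included_labels new_y).getD 0 : Nat) : Int)]) []
  (mapped_labels, pass1.2)

-- ===== PORT B =====
-- literal port of B: one fused pass over enumerate(labels), no intermediate buffer.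
def map_labels_only_idx_alt (labels : List Int) (excluded_labels : List Int) (included_labels : List Int) : List Int × List Int :=
  (PySem.List.enumerate labels 0).foldl
    (fun (acc : List Int × List Int) (p : Int × Int) =>
      if ¬ (p.2 ∈ excluded_labels) then
        (acc.1 ++ [if p.2 = -1 then (-1 : Int)
                   else (((PySem.List.index? included_labels p.2).getD 0 : Nat) : Int)],
         acc.2 ++ [p.1])
      else (acc.1 ++ [(-1 : Int)], acc.2)) ([], [])

-- ===== PRECONDITION & SPEC =====
-- Pre_ excludes exactly the inputs where A raises ValueError: some label outside
-- excluded_labels, other than the -1 sentinel, is missing from included_labels.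
def Pre_map_labels_only_idx (labels : List Int) (excluded_labels : List Int) (included_labels : List Int) : Prop :=
  ∀ y ∈ labels, y ∉ excluded_labels → y ≠ -1 → y ∈ included_labels
instance (labels : List Int) (excluded_labels : List Int) (included_labels : List Int) : Decidable (Pre_map_labels_only_idx labels excluded_labels included_labels) := by unfold Pre_map_labels_only_idx; infer_instance

def pvWitness_map_labels_only_idx : List Int × List Int × List Int := ([2, 5, -1, 3], [5], [3, 2])

def Spec_map_labels_only_idx (labels : List Int) (excluded_labels : List Int) (included_labels : List Int) (out : List Int × List Int) : Prop := out = map_labels_only_idx_alt labels excluded_labels included_labels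
instance (labels : List Int) (excluded_labels : List Int) (included_labels : List Int) (out : List Int × List Int) : Decidable (Spec_map_labels_only_idx labels excluded_labels included_labels out) := by unfold Spec_map_labels_only_idx; infer_instance

-- ===== CLAIM (what is proved, stated in full; the proofs are below) =====
def Claim_equal_map_labels_only_idx : Prop := ∀ (labels : List Int) (excluded_labels : List Int) (included_labels : List Int), Dom_map_labels_only_idx labels excluded_labels included_labels → Pre_map_labels_only_idx labels excluded_labels included_labels → Spec_map_labels_only_idx labels excluded_labels included_labels (map_labels_only_idx labels excluded_labels included_labels)

-- ===== LEMMAS AND PROOFS =====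

-- A's first pass: the first component is a map, the second a filtered projection.
lemma passA_fst (exc : List Int) (l : List (Int × Int)) (a1 a2 : List Int) :
    (l.foldl (fun (acc : List Int × List Int) (p : Int × Int) =>
      if ¬ (p.2 ∈ exc) then (acc.1 ++ [p.2], acc.2 ++ [p.1])
      else (acc.1 ++ [(-1 : Int)], acc.2)) (a1, a2)).1
    = a1 ++ l.map (fun p => if ¬ (p.2 ∈ exc) then p.2 else -1) := by
  induction l generalizing a1 a2 with
  | nil => simp
  | cons p t ih =>
    by_cases h : p.2 ∈ exc
    · rw [List.foldl_cons, if_neg (not_not_intro h), ih]; simp [h]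
    · rw [List.foldl_cons, if_pos h, ih]; simp [h]

lemma passA_snd (exc : List Int) (l : List (Int × Int)) (a1 a2 : List Int) :
    (l.foldl (fun (acc : List Int × List Int) (p : Int × Int) =>
      if ¬ (p.2 ∈ exc) then (acc.1 ++ [p.2], acc.2 ++ [p.1])
      else (acc.1 ++ [(-1 : Int)], acc.2)) (a1, a2)).2
    = a2 ++ (l.filter (fun p => ¬ (p.2 ∈ exc))).map (fun p => p.1) := by
  induction l generalizing a1 a2 with
  | nil => simp
  | cons p t ih =>
    by_cases h : p.2 ∈ exc
    · rw [List.foldl_cons, if_neg (not_not_intro h), ih]; simp [h]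
    · rw [List.foldl_cons, if_pos h, ih]; simp [h]

-- A's second pass is a map.
lemma passA2 (inc : List Int) (m a : List Int) :
    m.foldl (fun (acc : List Int) (new_y : Int) =>
      if new_y = -1 then acc ++ [new_y]
      else acc ++ [(((PySem.List.index? inc new_y).getD 0 : Nat) : Int)]) a
    = a ++ m.map (fun y => if y = -1 then y
        else (((PySem.List.index? inc y).getD 0 : Nat) : Int)) := by
  induction m generalizing a with
  | nil => simp
  | cons y t ih =>
    by_cases h : y = -1
    · rw [List.foldl_cons, if_pos h, ih]; simp [h]
    · rw [List.foldl_cons, if_neg h, ih]; simp [h]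

-- B's fold: first component is a map, second a filtered projection.
lemma passB_fst (exc inc : List Int) (l : List (Int × Int)) (a1 a2 : List Int) :
    (l.foldl (fun (acc : List Int × List Int) (p : Int × Int) =>
      if ¬ (p.2 ∈ exc) then
        (acc.1 ++ [if p.2 = -1 then (-1 : Int)
                   else (((PySem.List.index? inc p.2).getD 0 : Nat) : Int)],
         acc.2 ++ [p.1])
      else (acc.1 ++ [(-1 : Int)], acc.2)) (a1, a2)).1
    = a1 ++ l.map (fun p => if ¬ (p.2 ∈ exc) then
        (if p.2 = -1 then (-1 : Int)
         else (((PySem.List.index? inc p.2).getD 0 : Nat) : Int)) else -1) := by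
  induction l generalizing a1 a2 with
  | nil => simp
  | cons p t ih =>
    by_cases h : p.2 ∈ exc
    · rw [List.foldl_cons, if_neg (not_not_intro h), ih]; simp [h]
    · rw [List.foldl_cons, if_pos h, ih]; simp [h]

lemma passB_snd (exc inc : List Int) (l : List (Int × Int)) (a1 a2 : List Int) :
    (l.foldl (fun (acc : List Int × List Int) (p : Int × Int) =>
      if ¬ (p.2 ∈ exc) then
        (acc.1 ++ [if p.2 = -1 then (-1 : Int)
                   else (((PySem.List.index? inc p.2).getD 0 : Nat) : Int)],
         acc.2 ++ [p.1])
      else (acc.1 ++ [(-1 : Int)], acc.2)) (a1, a2)).2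
    = a2 ++ (l.filter (fun p => ¬ (p.2 ∈ exc))).map (fun p => p.1) := by
  induction l generalizing a1 a2 with
  | nil => simp
  | cons p t ih =>
    by_cases h : p.2 ∈ exc
    · rw [List.foldl_cons, if_neg (not_not_intro h), ih]; simp [h]
    · rw [List.foldl_cons, if_pos h, ih]; simp [h]

-- ===== VERDICT (by name: the statement is the Claim_ definition above) =====
theorem map_labels_only_idx_spec : Claim_equal_map_labels_only_idx := by
  intro labels exc inc _ _
  unfold Spec_map_labels_only_idx map_labels_only_idx map_labels_only_idx_alt
  simp only []
  refine Prod.ext ?_ ?_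
  · rw [passB_fst, passA_fst, passA2]
    simp only [List.nil_append, List.map_map, Function.comp_def]
    refine List.map_congr_left (fun p _ => ?_)
    by_cases h : p.2 ∈ exc <;> by_cases h1 : p.2 = -1 <;> simp [h, h1]
  · rw [passB_snd, passA_snd]
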